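-- pv_equiv track=rewrite | github.com/devXsalah/penguin_bubble_compiler_v2 | compiler/code_generator.py | _replace_custom_ops
-- ===== SOURCE A (Python) =====
-- def _replace_custom_ops(expression):
--     """
--     Replaces any inline custom operations (slideUp, slideDown, penguinBoost,
--     givePenguins, snowball) in the 'expression' string with their Python equivalents.
--     This is a naive string replacement approach.
--     """
--     replacements = {
--         "slideUp": "+",
--         "slideDown": "-",
--         "penguinBoost": "*",
--         "givePenguins": "/",
--         "snowball": "**"
--     }
--
--     for custom_op, py_op in replacements.items():
--         expression = expression.replace(custom_op, py_op)
--
--     return expression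
-- ===== SOURCE B (Python) =====
-- def _replace_custom_ops(expression):
--     """
--     Single left-to-right scan: at each position try the keywords in table
--     order; emit the Python operator on a match (skipping the keyword),
--     otherwise copy the character.  One pass instead of five full replaces.
--     """
--     replacements = {
--         "slideUp": "+",
--         "slideDown": "-",
--         "penguinBoost": "*",
--         "givePenguins": "/",
--         "snowball": "**"
--     }
--     out = []
--     i, n = 0, len(expression)
--     while i < n:
--         for custom_op, py_op in replacements.items():
--             if expression.startswith(custom_op, i):
--                 out.append(py_op)
--                 i += len(custom_op)
--                 break
--         else:
--             out.append(expression[i])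
--             i += 1
--     return "".join(out)
-- ===== Notes on version B (the rewrite author's own statement) =====
-- stated objective: alternative
-- what changed: Replaces five sequential full-string str.replace passes by a single left-to-right scan that tries the five keywords at each position via the same lookup table, emitting output once.
-- outside the precondition, e.g. on _replace_custom_ops('givePenguinslideUp'): A returns 'givePenguin+', B returns '/lideUp'; on _replace_custom_ops('givePenguinslideDown'): A returns 'givePenguin-', B returns '/lideDown'
import Mathlib
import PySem

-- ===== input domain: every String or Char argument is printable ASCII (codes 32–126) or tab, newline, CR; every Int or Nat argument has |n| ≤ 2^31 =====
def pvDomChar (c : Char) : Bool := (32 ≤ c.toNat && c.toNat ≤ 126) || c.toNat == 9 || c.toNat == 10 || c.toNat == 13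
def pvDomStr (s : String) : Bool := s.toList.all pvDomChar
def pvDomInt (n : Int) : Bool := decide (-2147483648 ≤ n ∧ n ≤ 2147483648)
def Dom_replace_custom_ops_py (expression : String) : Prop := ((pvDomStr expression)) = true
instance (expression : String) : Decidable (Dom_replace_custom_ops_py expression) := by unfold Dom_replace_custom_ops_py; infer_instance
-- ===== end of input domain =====

set_option maxRecDepth 8000


-- B replaces A's five sequential full-string replace passes by ONE left-to-right scan that
-- tries the keywords in table order at each position (alternative decomposition, same result).

-- ===== PORT A =====
-- five str.replace passes, in the dict's insertion order
def replace_custom_ops_py (expression : String) : String :=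
  let e1 := PySem.Str.replace expression "slideUp" "+"
  let e2 := PySem.Str.replace e1 "slideDown" "-"
  let e3 := PySem.Str.replace e2 "penguinBoost" "*"
  let e4 := PySem.Str.replace e3 "givePenguins" "/"
  PySem.Str.replace e4 "snowball" "**"

-- ===== PORT B =====
-- single scan: at each index try the keywords in table order (Source B's while/for-else loop)
def pvScanB : List Char → List Char
  | [] => []
  | c :: t =>
    if ("slideUp".toList).isPrefixOf (c :: t) then '+' :: pvScanB (t.drop 6)
    else if ("slideDown".toList).isPrefixOf (c :: t) then '-' :: pvScanB (t.drop 8)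
    else if ("penguinBoost".toList).isPrefixOf (c :: t) then '*' :: pvScanB (t.drop 11)
    else if ("givePenguins".toList).isPrefixOf (c :: t) then '/' :: pvScanB (t.drop 11)
    else if ("snowball".toList).isPrefixOf (c :: t) then '*' :: '*' :: pvScanB (t.drop 7)
    else c :: pvScanB t
termination_by l => l.length
decreasing_by all_goals simp [List.length_drop]

def replace_custom_ops_py_alt (expression : String) : String :=
  String.ofList (pvScanB expression.toList)

-- ===== PRECONDITION & SPEC =====
-- Pre_ excludes strings containing "givePenguinslideUp" or "givePenguinslideDown": there a
-- givePenguins occurrence overlaps a slideUp or slideDown occurrence, and A's pass-order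
-- result and B's leftmost-match result are both defensible readings no one would specify.
def Pre_replace_custom_ops_py (expression : String) : Prop :=
  PySem.Str.isIn "givePenguinslideUp" expression = false ∧
  PySem.Str.isIn "givePenguinslideDown" expression = false
instance (expression : String) : Decidable (Pre_replace_custom_ops_py expression) := by
  unfold Pre_replace_custom_ops_py; infer_instance

def pvWitness_replace_custom_ops_py : String := "x slideUp snowball givePenguins y"

def Spec_replace_custom_ops_py (expression : String) (out : String) : Prop := out = replace_custom_ops_py_alt expression
instance (expression : String) (out : String) : Decidable (Spec_replace_custom_ops_py expression out) := by unfold Spec_replace_custom_ops_py; infer_instance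

-- ===== CLAIM (what is proved, stated in full; the proofs are below) =====
def Claim_equal_replace_custom_ops_py : Prop := ∀ (expression : String), Dom_replace_custom_ops_py expression → Pre_replace_custom_ops_py expression → Spec_replace_custom_ops_py expression (replace_custom_ops_py expression)

-- ===== LEMMAS AND PROOFS =====

-- structural (fuel-free) version of PySem.Chars.replace for a nonempty pattern
def pvRepl (o : Char) (os nw : List Char) : List Char → List Char
  | [] => []
  | c :: t =>
    if (o :: os).isPrefixOf (c :: t) then nw ++ pvRepl o os nw (t.drop os.length)
    else c :: pvRepl o os nw t
termination_by l => l.length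
decreasing_by all_goals simp [List.length_drop]

theorem pvGo_eq (o : Char) (os nw : List Char) :
    ∀ fuel l acc, l.length ≤ fuel →
      PySem.Chars.replace.go (o :: os) nw fuel l acc = acc.reverse ++ pvRepl o os nw l := by
  intro fuel
  induction fuel with
  | zero =>
      intro l acc h
      have : l = [] := by
        cases l with
        | nil => rfl
        | cons c t => simp at h
      subst this
      simp [PySem.Chars.replace.go, pvRepl]
  | succ n ih =>
      intro l acc h
      cases l with
      | nil => simp [PySem.Chars.replace.go, pvRepl]
      | cons c t =>
          rw [PySem.Chars.replace.go]
          by_cases hp : (o :: os).isPrefixOf (c :: t) = true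
          · rw [if_pos hp]
            have hd : List.drop (o :: os).length (c :: t) = t.drop os.length := by simp
            rw [hd, ih _ _ (by simp at h ⊢; omega)]
            rw [pvRepl]
            simp [hp]
          · rw [if_neg hp]
            rw [ih _ _ (by simp at h ⊢; omega)]
            rw [pvRepl]
            simp [hp]

theorem pvReplace_eq (o : Char) (os nw l : List Char) :
    PySem.Chars.replace l (o :: os) nw = pvRepl o os nw l := by
  rw [PySem.Chars.replace]
  simp [pvGo_eq o os nw l.length l [] (le_refl _)]



theorem pvPrefix_reflect (o : Char) (os : List Char) (b : Char) (nb : List Char) :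
    ∀ (n : Nat) (u w : List Char), u.length ≤ n → (∀ a ∈ w, a ∉ b :: nb) →
      w <+: pvRepl o os (b :: nb) u → w <+: u := by
  intro n
  induction n with
  | zero =>
      intro u w hu hw hp
      have : u = [] := by cases u with
        | nil => rfl
        | cons c t => simp at hu
      subst this
      simpa [pvRepl] using hp
  | succ n ih =>
      intro u w hu hw hp
      cases u with
      | nil => simpa [pvRepl] using hp
      | cons c t =>
          rw [pvRepl] at hp
          by_cases hm : (o :: os).isPrefixOf (c :: t) = true
          · rw [if_pos hm] at hp
            cases w with
            | nil => exact List.nil_prefix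
            | cons a w' =>
                exfalso
                rw [List.cons_append] at hp
                rw [List.cons_prefix_cons] at hp
                exact (hw a (by simp)) (by simp [hp.1])
          · rw [if_neg hm] at hp
            cases w with
            | nil => exact List.nil_prefix
            | cons a w' =>
                rw [List.cons_prefix_cons] at hp
                have := ih t w' (by simp at hu; omega) (fun a ha => hw a (by simp [ha])) hp.2
                rw [List.cons_prefix_cons]
                exact ⟨hp.1, this⟩


def pvR1 (l : List Char) : List Char := pvRepl 's' ['l','i','d','e','U','p'] ['+'] l
def pvR2 (l : List Char) : List Char := pvRepl 's' ['l','i','d','e','D','o','w','n'] ['-'] l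
def pvR3 (l : List Char) : List Char := pvRepl 'p' ['e','n','g','u','i','n','B','o','o','s','t'] ['*'] l
def pvR4 (l : List Char) : List Char := pvRepl 'g' ['i','v','e','P','e','n','g','u','i','n','s'] ['/'] l
def pvR5 (l : List Char) : List Char := pvRepl 's' ['n','o','w','b','a','l','l'] ['*','*'] l
def pvChain (l : List Char) : List Char := pvR5 (pvR4 (pvR3 (pvR2 (pvR1 l))))

theorem pvStepA1 (u : List Char) :
    pvChain (['s','l','i','d','e','U','p'] ++ u) = '+' :: pvChain u := by
  simp [pvChain, pvR1, pvR2, pvR3, pvR4, pvR5, pvRepl, List.isPrefixOf]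

theorem pvStepA2 (u : List Char) :
    pvChain (['s','l','i','d','e','D','o','w','n'] ++ u) = '-' :: pvChain u := by
  simp [pvChain, pvR1, pvR2, pvR3, pvR4, pvR5, pvRepl, List.isPrefixOf]

theorem pvStepA3 (u : List Char) :
    pvChain (['p','e','n','g','u','i','n','B','o','o','s','t'] ++ u) = '*' :: pvChain u := by
  simp [pvChain, pvR1, pvR2, pvR3, pvR4, pvR5, pvRepl, List.isPrefixOf]

theorem pvStepA4 (u : List Char)
    (h1 : ['l','i','d','e','U','p'].isPrefixOf u = false)
    (h2 : ['l','i','d','e','D','o','w','n'].isPrefixOf u = false) :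
    pvChain (['g','i','v','e','P','e','n','g','u','i','n','s'] ++ u) = '/' :: pvChain u := by
  have hr2 : (['l','i','d','e','D','o','w','n']).isPrefixOf (pvR1 u) = false := by
    rw [Bool.eq_false_iff]
    intro hp
    rw [List.isPrefixOf_iff_prefix] at hp
    have h := pvPrefix_reflect 's' ['l','i','d','e','U','p'] '+' [] u.length u _ le_rfl (by intro a ha hmem; simp at hmem; subst hmem; simp at ha) hp
    rw [← List.isPrefixOf_iff_prefix] at h
    simp [h2] at h
  have e1 : pvR1 (['g','i','v','e','P','e','n','g','u','i','n','s'] ++ u)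
      = ['g','i','v','e','P','e','n','g','u','i','n','s'] ++ pvR1 u := by
    simp [pvR1, pvRepl, List.isPrefixOf, h1]
  have e2 : pvR2 (['g','i','v','e','P','e','n','g','u','i','n','s'] ++ pvR1 u)
      = ['g','i','v','e','P','e','n','g','u','i','n','s'] ++ pvR2 (pvR1 u) := by
    simp [pvR2, pvRepl, List.isPrefixOf, hr2]
  have e3 : ∀ v, pvR3 (['g','i','v','e','P','e','n','g','u','i','n','s'] ++ v)
      = ['g','i','v','e','P','e','n','g','u','i','n','s'] ++ pvR3 v := by
    intro v; simp [pvR3, pvRepl, List.isPrefixOf]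
  have e4 : ∀ v, pvR4 (['g','i','v','e','P','e','n','g','u','i','n','s'] ++ v) = '/' :: pvR4 v := by
    intro v; simp [pvR4, pvRepl, List.isPrefixOf]
  have e5 : ∀ v, pvR5 ('/' :: v) = '/' :: pvR5 v := by
    intro v; simp [pvR5, pvRepl, List.isPrefixOf]
  simp only [pvChain, e1, e2, e3, e4, e5]

theorem pvStepA5 (u : List Char) :
    pvChain (['s','n','o','w','b','a','l','l'] ++ u) = '*' :: '*' :: pvChain u := by
  simp [pvChain, pvR1, pvR2, pvR3, pvR4, pvR5, pvRepl, List.isPrefixOf]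

theorem pvK1_eq : "slideUp".toList = ['s','l','i','d','e','U','p'] := rfl
theorem pvK2_eq : "slideDown".toList = ['s','l','i','d','e','D','o','w','n'] := rfl
theorem pvK3_eq : "penguinBoost".toList = ['p','e','n','g','u','i','n','B','o','o','s','t'] := rfl
theorem pvK4_eq : "givePenguins".toList = ['g','i','v','e','P','e','n','g','u','i','n','s'] := rfl
theorem pvK5_eq : "snowball".toList = ['s','n','o','w','b','a','l','l'] := rfl

theorem pvStepB1 (u : List Char) : pvScanB (['s','l','i','d','e','U','p'] ++ u) = '+' :: pvScanB u := by
  simp [pvScanB, List.isPrefixOf, pvK1_eq]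

theorem pvStepB2 (u : List Char) : pvScanB (['s','l','i','d','e','D','o','w','n'] ++ u) = '-' :: pvScanB u := by
  simp [pvScanB, List.isPrefixOf, pvK1_eq, pvK2_eq]

theorem pvStepB3 (u : List Char) : pvScanB (['p','e','n','g','u','i','n','B','o','o','s','t'] ++ u) = '*' :: pvScanB u := by
  simp [pvScanB, List.isPrefixOf, pvK1_eq, pvK2_eq, pvK3_eq]

theorem pvStepB4 (u : List Char) : pvScanB (['g','i','v','e','P','e','n','g','u','i','n','s'] ++ u) = '/' :: pvScanB u := by
  simp [pvScanB, List.isPrefixOf, pvK1_eq, pvK2_eq, pvK3_eq, pvK4_eq]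

theorem pvStepB5 (u : List Char) : pvScanB (['s','n','o','w','b','a','l','l'] ++ u) = '*' :: '*' :: pvScanB u := by
  simp [pvScanB, List.isPrefixOf, pvK1_eq, pvK2_eq, pvK3_eq, pvK4_eq, pvK5_eq]

theorem pvRepl_cons_not (o : Char) (os nw : List Char) (c : Char) (x : List Char)
    (h : ¬ ((o :: os) <+: (c :: x))) : pvRepl o os nw (c :: x) = c :: pvRepl o os nw x := by
  rw [pvRepl, if_neg]
  simpa [List.isPrefixOf_iff_prefix] using h

theorem pvReflect1 {u w : List Char} (hw : ∀ a ∈ w, a ≠ '+') : w <+: pvR1 u → w <+: u :=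
  pvPrefix_reflect 's' ['l','i','d','e','U','p'] '+' [] u.length u w le_rfl
    (fun a ha => by simpa using hw a ha)

theorem pvReflect2 {u w : List Char} (hw : ∀ a ∈ w, a ≠ '-') : w <+: pvR2 u → w <+: u :=
  pvPrefix_reflect 's' ['l','i','d','e','D','o','w','n'] '-' [] u.length u w le_rfl
    (fun a ha => by simpa using hw a ha)

theorem pvReflect3 {u w : List Char} (hw : ∀ a ∈ w, a ≠ '*') : w <+: pvR3 u → w <+: u :=
  pvPrefix_reflect 'p' ['e','n','g','u','i','n','B','o','o','s','t'] '*' [] u.length u w le_rfl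
    (fun a ha => by simpa using hw a ha)

theorem pvReflect4 {u w : List Char} (hw : ∀ a ∈ w, a ≠ '/') : w <+: pvR4 u → w <+: u :=
  pvPrefix_reflect 'g' ['i','v','e','P','e','n','g','u','i','n','s'] '/' [] u.length u w le_rfl
    (fun a ha => by simpa using hw a ha)

theorem pvStepA0 (c : Char) (t : List Char)
    (h1 : ¬ (['s','l','i','d','e','U','p'] <+: c :: t))
    (h2 : ¬ (['s','l','i','d','e','D','o','w','n'] <+: c :: t))
    (h3 : ¬ (['p','e','n','g','u','i','n','B','o','o','s','t'] <+: c :: t))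
    (h4 : ¬ (['g','i','v','e','P','e','n','g','u','i','n','s'] <+: c :: t))
    (h5 : ¬ (['s','n','o','w','b','a','l','l'] <+: c :: t)) :
    pvChain (c :: t) = c :: pvChain t := by
  have e1 : pvR1 (c :: t) = c :: pvR1 t := pvRepl_cons_not _ _ _ _ _ h1
  have e2 : pvR2 (c :: pvR1 t) = c :: pvR2 (pvR1 t) := by
    refine pvRepl_cons_not _ _ _ _ _ ?_
    intro hp
    rw [List.cons_prefix_cons] at hp
    have := pvReflect1 (by intro a ha hav; subst hav; simp at ha) hp.2
    exact h2 (List.cons_prefix_cons.mpr ⟨hp.1, this⟩)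
  have e3 : pvR3 (c :: pvR2 (pvR1 t)) = c :: pvR3 (pvR2 (pvR1 t)) := by
    refine pvRepl_cons_not _ _ _ _ _ ?_
    intro hp
    rw [List.cons_prefix_cons] at hp
    have r2 := pvReflect2 (by intro a ha hav; subst hav; simp at ha) hp.2
    have r1 := pvReflect1 (by intro a ha hav; subst hav; simp at ha) r2
    exact h3 (List.cons_prefix_cons.mpr ⟨hp.1, r1⟩)
  have e4 : pvR4 (c :: pvR3 (pvR2 (pvR1 t))) = c :: pvR4 (pvR3 (pvR2 (pvR1 t))) := by
    refine pvRepl_cons_not _ _ _ _ _ ?_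
    intro hp
    rw [List.cons_prefix_cons] at hp
    have r3 := pvReflect3 (by intro a ha hav; subst hav; simp at ha) hp.2
    have r2 := pvReflect2 (by intro a ha hav; subst hav; simp at ha) r3
    have r1 := pvReflect1 (by intro a ha hav; subst hav; simp at ha) r2
    exact h4 (List.cons_prefix_cons.mpr ⟨hp.1, r1⟩)
  have e5 : pvR5 (c :: pvR4 (pvR3 (pvR2 (pvR1 t)))) = c :: pvR5 (pvR4 (pvR3 (pvR2 (pvR1 t)))) := by
    refine pvRepl_cons_not _ _ _ _ _ ?_
    intro hp
    rw [List.cons_prefix_cons] at hp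
    have r4 := pvReflect4 (by intro a ha hav; subst hav; simp at ha) hp.2
    have r3 := pvReflect3 (by intro a ha hav; subst hav; simp at ha) r4
    have r2 := pvReflect2 (by intro a ha hav; subst hav; simp at ha) r3
    have r1 := pvReflect1 (by intro a ha hav; subst hav; simp at ha) r2
    exact h5 (List.cons_prefix_cons.mpr ⟨hp.1, r1⟩)
  simp only [pvChain, e1, e2, e3, e4, e5]

theorem pvStepB0 (c : Char) (t : List Char)
    (h1 : ¬ (['s','l','i','d','e','U','p'] <+: c :: t))
    (h2 : ¬ (['s','l','i','d','e','D','o','w','n'] <+: c :: t))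
    (h3 : ¬ (['p','e','n','g','u','i','n','B','o','o','s','t'] <+: c :: t))
    (h4 : ¬ (['g','i','v','e','P','e','n','g','u','i','n','s'] <+: c :: t))
    (h5 : ¬ (['s','n','o','w','b','a','l','l'] <+: c :: t)) :
    pvScanB (c :: t) = c :: pvScanB t := by
  rw [pvScanB]
  rw [if_neg (by simpa [pvK1_eq, List.isPrefixOf_iff_prefix] using h1)]
  rw [if_neg (by simpa [pvK2_eq, List.isPrefixOf_iff_prefix] using h2)]
  rw [if_neg (by simpa [pvK3_eq, List.isPrefixOf_iff_prefix] using h3)]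
  rw [if_neg (by simpa [pvK4_eq, List.isPrefixOf_iff_prefix] using h4)]
  rw [if_neg (by simpa [pvK5_eq, List.isPrefixOf_iff_prefix] using h5)]

def pvGood (l : List Char) : Prop :=
  ¬ ("givePenguinslideUp".toList <:+: l) ∧ ¬ ("givePenguinslideDown".toList <:+: l)

theorem pvGood_suffix {l u : List Char} (h : u <:+ l) (hg : pvGood l) : pvGood u :=
  ⟨fun hi => hg.1 (hi.trans h.isInfix), fun hi => hg.2 (hi.trans h.isInfix)⟩

theorem pvMain : ∀ n l, l.length ≤ n → pvGood l → pvChain l = pvScanB l := by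
  intro n
  induction n with
  | zero =>
      intro l h _
      have : l = [] := by
        cases l with
        | nil => rfl
        | cons c t => simp at h
      subst this
      simp [pvChain, pvR1, pvR2, pvR3, pvR4, pvR5, pvRepl, pvScanB]
  | succ n ih =>
      intro l hl hg
      cases l with
      | nil => simp [pvChain, pvR1, pvR2, pvR3, pvR4, pvR5, pvRepl, pvScanB]
      | cons c t =>
          by_cases q1 : ['s','l','i','d','e','U','p'] <+: c :: t
          · obtain ⟨u, hu⟩ := q1
            rw [← hu, pvStepA1, pvStepB1]
            have hlen : u.length ≤ n := by
              have := congrArg List.length hu; simp at this hl; omega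
            exact congrArg (List.cons '+') (ih u hlen (pvGood_suffix ⟨_, hu⟩ hg))
          · by_cases q2 : ['s','l','i','d','e','D','o','w','n'] <+: c :: t
            · obtain ⟨u, hu⟩ := q2
              rw [← hu, pvStepA2, pvStepB2]
              have hlen : u.length ≤ n := by
                have := congrArg List.length hu; simp at this hl; omega
              exact congrArg (List.cons '-') (ih u hlen (pvGood_suffix ⟨_, hu⟩ hg))
            · by_cases q3 : ['p','e','n','g','u','i','n','B','o','o','s','t'] <+: c :: t
              · obtain ⟨u, hu⟩ := q3
                rw [← hu, pvStepA3, pvStepB3]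
                have hlen : u.length ≤ n := by
                  have := congrArg List.length hu; simp at this hl; omega
                exact congrArg (List.cons '*') (ih u hlen (pvGood_suffix ⟨_, hu⟩ hg))
              · by_cases q4 : ['g','i','v','e','P','e','n','g','u','i','n','s'] <+: c :: t
                · obtain ⟨u, hu⟩ := q4
                  have hb1 : ['l','i','d','e','U','p'].isPrefixOf u = false := by
                    rw [Bool.eq_false_iff]
                    intro hp
                    rw [List.isPrefixOf_iff_prefix] at hp
                    obtain ⟨w, hw⟩ := hp
                    apply hg.1
                    refine List.IsPrefix.isInfix ⟨w, ?_⟩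
                    rw [show ("givePenguinslideUp".toList)
                        = ['g','i','v','e','P','e','n','g','u','i','n','s'] ++ ['l','i','d','e','U','p'] from rfl]
                    rw [List.append_assoc, hw, hu]
                  have hb2 : ['l','i','d','e','D','o','w','n'].isPrefixOf u = false := by
                    rw [Bool.eq_false_iff]
                    intro hp
                    rw [List.isPrefixOf_iff_prefix] at hp
                    obtain ⟨w, hw⟩ := hp
                    apply hg.2
                    refine List.IsPrefix.isInfix ⟨w, ?_⟩
                    rw [show ("givePenguinslideDown".toList)
                        = ['g','i','v','e','P','e','n','g','u','i','n','s'] ++ ['l','i','d','e','D','o','w','n'] from rfl]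
                    rw [List.append_assoc, hw, hu]
                  rw [← hu, pvStepA4 u hb1 hb2, pvStepB4]
                  have hlen : u.length ≤ n := by
                    have := congrArg List.length hu; simp at this hl; omega
                  exact congrArg (List.cons '/') (ih u hlen (pvGood_suffix ⟨_, hu⟩ hg))
                · by_cases q5 : ['s','n','o','w','b','a','l','l'] <+: c :: t
                  · obtain ⟨u, hu⟩ := q5
                    rw [← hu, pvStepA5, pvStepB5]
                    have hlen : u.length ≤ n := by
                      have := congrArg List.length hu; simp at this hl; omega
                    exact congrArg (fun x => '*' :: '*' :: x) (ih u hlen (pvGood_suffix ⟨_, hu⟩ hg))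
                  · rw [pvStepA0 c t q1 q2 q3 q4 q5, pvStepB0 c t q1 q2 q3 q4 q5]
                    have hlen : t.length ≤ n := by simp at hl; omega
                    exact congrArg (List.cons c) (ih t hlen (pvGood_suffix (List.suffix_cons c t) hg))

-- ===== VERDICT (by name: the statement is the Claim_ definition above) =====
theorem replace_custom_ops_py_spec : Claim_equal_replace_custom_ops_py := by
  intro expression _ hpre
  obtain ⟨hp1, hp2⟩ := hpre
  have hg : pvGood expression.toList := by
    constructor
    · intro hi
      have h := (PySem.Str.isIn_iff_infix "givePenguinslideUp" expression).mpr hi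
      rw [hp1] at h
      exact Bool.false_ne_true h
    · intro hi
      have h := (PySem.Str.isIn_iff_infix "givePenguinslideDown" expression).mpr hi
      rw [hp2] at h
      exact Bool.false_ne_true h
  unfold Spec_replace_custom_ops_py replace_custom_ops_py replace_custom_ops_py_alt
  simp only [PySem.Str.replace, String.toList_ofList]
  rw [pvK1_eq, pvK2_eq, pvK3_eq, pvK4_eq, pvK5_eq,
      show "+".toList = ['+'] from rfl, show "-".toList = ['-'] from rfl,
      show "*".toList = ['*'] from rfl, show "/".toList = ['/'] from rfl,
      show "**".toList = ['*','*'] from rfl]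
  rw [pvReplace_eq, pvReplace_eq, pvReplace_eq, pvReplace_eq, pvReplace_eq]
  exact congrArg String.ofList (pvMain expression.toList.length expression.toList le_rfl hg)
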